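-- pv_equiv track=rewrite | github.com/ekmixon/vpp-agent | tests/robot/libraries/etcdctl.py | convert_etcd_dump_to_json
-- ===== SOURCE A (Python) =====
-- def convert_etcd_dump_to_json(dump):
--     etcd_json = '['
--     key = ''
--     data = ''
--     firstline = True
--     for line in dump.splitlines():
--         if line.strip() != '':
--             if line[0] == '/':
--                 if not firstline:
--                     etcd_json += '{"key":"'+key+'","node":"'+node+'","name":"'+name+'","type":"'+type+'","data":'+data+'},'
--                 key = line
--                 node = key.split('/')[2]
--                 name = key.split('/')[-1]
--                 type = key.split('/')[4]
--                 data = ''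
--                 firstline = False
--             else:
--                 if line == "null":
--                     line = '{"error":"null"}'
--                 data += line
--     if not firstline:
--         etcd_json += '{"key":"'+key+'","node":"'+node+'","name":"'+name+'","type":"'+type+'","data":'+data+'}'
--     etcd_json += ']'
--     return etcd_json
-- ===== SOURCE B (Python) =====
-- def convert_etcd_dump_to_json(dump):
--     # Pass 1: group non-blank lines into (key, data) blocks.
--     blocks = []
--     for line in dump.splitlines():
--         if line.strip() == '':
--             continue
--         if line[0] == '/':
--             blocks.append([line, ''])
--         elif blocks:
--             blocks[-1][1] += '{"error":"null"}' if line == 'null' else line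
--     # Pass 2: format each block and join.
--     parts = []
--     for key, data in blocks:
--         segs = key.split('/')
--         parts.append('{"key":"' + key + '","node":"' + segs[2] + '","name":"' + segs[-1]
--                      + '","type":"' + segs[4] + '","data":' + data + '}')
--     return '[' + ','.join(parts) + ']'
-- ===== Notes on version B (the rewrite author's own statement) =====
-- stated objective: alternative
-- what changed: B replaces A's single loop threaded through seven mutable variables (json string, key, node, name, type, data, firstline flag) with two passes: pass one only groups non-blank lines into (key, data) blocks, pass two formats each block from its key's splits and joins the fragments with ','.
import Mathlib
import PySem

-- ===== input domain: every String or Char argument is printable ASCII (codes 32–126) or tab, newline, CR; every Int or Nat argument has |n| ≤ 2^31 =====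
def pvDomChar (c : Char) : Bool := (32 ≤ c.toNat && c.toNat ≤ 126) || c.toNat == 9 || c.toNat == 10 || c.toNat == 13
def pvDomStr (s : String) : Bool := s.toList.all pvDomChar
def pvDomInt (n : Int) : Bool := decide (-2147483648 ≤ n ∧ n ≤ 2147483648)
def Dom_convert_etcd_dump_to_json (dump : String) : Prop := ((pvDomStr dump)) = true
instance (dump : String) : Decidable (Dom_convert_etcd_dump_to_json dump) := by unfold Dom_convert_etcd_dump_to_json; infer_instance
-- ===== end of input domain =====

-- B re-groups the dump into (key,data) blocks in one pass and formats/joins them in a second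
-- pass (a different decomposition of the same O(n) job); equal return values proved below.

-- ===== PORT A =====
-- the record string A concatenates
def pvRecA (key node name ty data : String) : String :=
  "{\"key\":\"" ++ key ++ "\",\"node\":\"" ++ node ++ "\",\"name\":\"" ++ name ++
  "\",\"type\":\"" ++ ty ++ "\",\"data\":" ++ data ++ "}"

-- loop body of A; state = (etcd_json, key, node, name, type, data, firstline).
-- Python raises IndexError at key.split('/')[2]/[4] on short keys; Pre_ excludes those
-- inputs, so the pyGetD defaults are never reached on admitted inputs.
def pvAStep (st : String × String × String × String × String × String × Bool)
    (line : String) : String × String × String × String × String × String × Bool :=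
  match st with
  | (json, key, node, name, ty, data, fl) =>
    if PySem.Str.strip line ≠ "" then
      if PySem.Str.pyGet? line 0 = some '/' then
        let json' := if fl = false then json ++ pvRecA key node name ty data ++ "," else json
        let segs := (PySem.Str.split? line "/").getD []
        (json', line, PySem.List.pyGetD segs 2 "", PySem.List.pyGetD segs (-1) "",
          PySem.List.pyGetD segs 4 "", "", false)
      else
        let l' := if line = "null" then "{\"error\":\"null\"}" else line
        (json, key, node, name, ty, data ++ l', fl)
    else st

def convert_etcd_dump_to_json (dump : String) : String :=
  match (PySem.Str.splitlines dump).foldl pvAStep ("[", "", "", "", "", "", true) with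
  | (json, key, node, name, ty, data, fl) =>
    (if fl = false then json ++ pvRecA key node name ty data else json) ++ "]"

-- ===== PORT B =====
-- blocks[-1][1] += s
def pvAddLast : List (String × String) → String → List (String × String)
  | [], _ => []
  | [(k, d)], s => [(k, d ++ s)]
  | b :: bs, s => b :: pvAddLast bs s

-- pass 1 loop body of B
def pvBStep (blocks : List (String × String)) (line : String) : List (String × String) :=
  if PySem.Str.strip line = "" then blocks
  else if PySem.Str.pyGet? line 0 = some '/' then blocks ++ [(line, "")]
  else pvAddLast blocks (if line = "null" then "{\"error\":\"null\"}" else line)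

-- pass 2 per-block formatter of B
def pvBFmt (kd : String × String) : String :=
  let segs := (PySem.Str.split? kd.1 "/").getD []
  "{\"key\":\"" ++ kd.1 ++ "\",\"node\":\"" ++ PySem.List.pyGetD segs 2 "" ++
  "\",\"name\":\"" ++ PySem.List.pyGetD segs (-1) "" ++ "\",\"type\":\"" ++
  PySem.List.pyGetD segs 4 "" ++ "\",\"data\":" ++ kd.2 ++ "}"

def convert_etcd_dump_to_json_alt (dump : String) : String :=
  let blocks := (PySem.Str.splitlines dump).foldl pvBStep []
  "[" ++ PySem.Str.join "," (blocks.map pvBFmt) ++ "]"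

-- ===== PRECONDITION & SPEC =====
-- Pre_ excludes exactly the inputs where the Python A raises IndexError: a non-blank line
-- starting with '/' whose '/'-split has fewer than 5 parts (key.split('/')[4] fails).
def Pre_convert_etcd_dump_to_json (dump : String) : Prop :=
  ∀ line ∈ PySem.Str.splitlines dump, PySem.Str.strip line ≠ "" →
    PySem.Str.pyGet? line 0 = some '/' → 5 ≤ ((PySem.Str.split? line "/").getD []).length
instance (dump : String) : Decidable (Pre_convert_etcd_dump_to_json dump) := by
  unfold Pre_convert_etcd_dump_to_json; infer_instance

def pvWitness_convert_etcd_dump_to_json : String :=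
  "/vnf-agent/node1/check/status/v1/agent\nnull\n/vnf-agent/node1/vpp/status/v1/if\n{\"x\":1}"

def Spec_convert_etcd_dump_to_json (dump : String) (out : String) : Prop :=
  out = convert_etcd_dump_to_json_alt dump
instance (dump : String) (out : String) : Decidable (Spec_convert_etcd_dump_to_json dump out) := by
  unfold Spec_convert_etcd_dump_to_json; infer_instance

-- ===== CLAIM (what is proved, stated in full; the proofs are below) =====
def Claim_equal_convert_etcd_dump_to_json : Prop := ∀ (dump : String), Dom_convert_etcd_dump_to_json dump → Pre_convert_etcd_dump_to_json dump → Spec_convert_etcd_dump_to_json dump (convert_etcd_dump_to_json dump)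

-- ===== LEMMAS AND PROOFS =====

theorem pv_witness_ok :
    Dom_convert_etcd_dump_to_json pvWitness_convert_etcd_dump_to_json ∧
    Pre_convert_etcd_dump_to_json pvWitness_convert_etcd_dump_to_json := by
  constructor <;> decide

-- join facts (cite String.ofList_append / String.append_assoc from the library)
theorem pv_join_nil : PySem.Str.join "," ([] : List String) = "" := rfl

theorem pv_join_one (x : String) : PySem.Str.join "," [x] = x := by
  simp [PySem.Str.join, PySem.Chars.join, List.intercalate]

theorem pv_join_cons (x : String) (xs : List String) (h : xs ≠ []) :
    PySem.Str.join "," (x :: xs) = x ++ "," ++ PySem.Str.join "," xs := by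
  cases xs with
  | nil => exact absurd rfl h
  | cons y ys =>
    simp [PySem.Str.join, PySem.Chars.join, List.intercalate]
    rw [show (',' :: (List.intersperse [','] (y.toList :: List.map String.toList ys)).flatten)
        = [','] ++ (List.intersperse [','] (y.toList :: List.map String.toList ys)).flatten from rfl]
    rw [String.ofList_append, ← String.append_assoc]

theorem pv_addLast_ne_nil (blocks : List (String × String)) (s : String) (h : blocks ≠ []) :
    pvAddLast blocks s ≠ [] := by
  cases blocks with
  | nil => exact absurd rfl h
  | cons b bs =>
    obtain ⟨k, d⟩ := b
    cases bs with
    | nil => simp [pvAddLast]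
    | cons b' bs' => simp [pvAddLast]

-- pvAddLast distributes over a nonempty tail
theorem pv_addLast_append (bs rest : List (String × String)) (s : String) (h : rest ≠ []) :
    pvAddLast (bs ++ rest) s = bs ++ pvAddLast rest s := by
  induction bs with
  | nil => rfl
  | cons b bs ih =>
    cases bs with
    | nil =>
      cases rest with
      | nil => exact absurd rfl h
      | cons r rs => rfl
    | cons b' bs' => simpa [pvAddLast] using ih

theorem pv_bStep_ne_nil (blocks : List (String × String)) (line : String) (h : blocks ≠ []) :
    pvBStep blocks line ≠ [] := by
  unfold pvBStep
  split_ifs with h1 h2 h3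
  · exact h
  · simp
  · exact pv_addLast_ne_nil _ _ h
  · exact pv_addLast_ne_nil _ _ h

theorem pv_bRun_ne_nil (ls : List String) (blocks : List (String × String)) (h : blocks ≠ []) :
    ls.foldl pvBStep blocks ≠ [] := by
  induction ls generalizing blocks with
  | nil => exact h
  | cons l ls ih => exact ih _ (pv_bStep_ne_nil _ _ h)

theorem pv_bRun_append (ls : List String) (bs rest : List (String × String)) (h : rest ≠ []) :
    ls.foldl pvBStep (bs ++ rest) = bs ++ ls.foldl pvBStep rest := by
  induction ls generalizing rest with
  | nil => rfl
  | cons l ls ih =>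
    have hstep : pvBStep (bs ++ rest) l = bs ++ pvBStep rest l := by
      unfold pvBStep
      split_ifs with h1 h2 h3
      · rfl
      · simp
      · exact pv_addLast_append bs rest _ h
      · exact pv_addLast_append bs rest _ h
    simp only [List.foldl_cons, hstep]
    exact ih _ (pv_bStep_ne_nil _ _ h)

-- finish A's loop state into A's return value
def pvFin (st : String × String × String × String × String × String × Bool) : String :=
  match st with
  | (json, key, node, name, ty, data, fl) =>
    (if fl = false then json ++ pvRecA key node name ty data else json) ++ "]"

-- the tail of B's output: formatted blocks joined with ',' plus the closing bracket
def pvTail (blocks : List (String × String)) : String :=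
  PySem.Str.join "," (blocks.map pvBFmt) ++ "]"

-- after the first key line A's record fields are the splits of the current key and
-- firstline stays false; the finished output equals json ++ B's tail for the open block
theorem pv_agree (ls : List String) (json k d : String) :
    pvFin (ls.foldl pvAStep (json, k,
        PySem.List.pyGetD ((PySem.Str.split? k "/").getD []) 2 "",
        PySem.List.pyGetD ((PySem.Str.split? k "/").getD []) (-1) "",
        PySem.List.pyGetD ((PySem.Str.split? k "/").getD []) 4 "", d, false)) =
    json ++ pvTail (ls.foldl pvBStep [(k, d)]) := by
  induction ls generalizing json k d with
  | nil =>
    simp [pvFin, pvTail, pv_join_one, pvRecA, pvBFmt, String.append_assoc]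
  | cons l ls ih =>
    by_cases hb : PySem.Str.strip l = ""
    · simpa [pvAStep, pvBStep, hb] using ih json k d
    · by_cases hk : PySem.Str.pyGet? l 0 = some '/'
      · have hA : pvAStep (json, k,
            PySem.List.pyGetD ((PySem.Str.split? k "/").getD []) 2 "",
            PySem.List.pyGetD ((PySem.Str.split? k "/").getD []) (-1) "",
            PySem.List.pyGetD ((PySem.Str.split? k "/").getD []) 4 "", d, false) l =
            (json ++ pvRecA k
              (PySem.List.pyGetD ((PySem.Str.split? k "/").getD []) 2 "")
              (PySem.List.pyGetD ((PySem.Str.split? k "/").getD []) (-1) "")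
              (PySem.List.pyGetD ((PySem.Str.split? k "/").getD []) 4 "") d ++ ",", l,
              PySem.List.pyGetD ((PySem.Str.split? l "/").getD []) 2 "",
              PySem.List.pyGetD ((PySem.Str.split? l "/").getD []) (-1) "",
              PySem.List.pyGetD ((PySem.Str.split? l "/").getD []) 4 "", "", false) := by
          simp [pvAStep, hb, show PySem.List.pyGet? l.toList 0 = some '/' by simpa using hk]
        have hB : pvBStep [(k, d)] l = [(k, d)] ++ [(l, "")] := by
          simp [pvBStep, hb, show PySem.List.pyGet? l.toList 0 = some '/' by simpa using hk]
        have hne : ls.foldl pvBStep [(l, "")] ≠ [] := pv_bRun_ne_nil ls _ (by simp)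
        rw [List.foldl_cons, List.foldl_cons, hA, hB,
          pv_bRun_append ls [(k, d)] [(l, "")] (by simp), ih]
        rw [pvTail, pvTail, List.map_append, List.map_cons, List.map_nil,
          List.singleton_append, pv_join_cons _ _ (by simpa using hne)]
        simp [pvBFmt, pvRecA, String.append_assoc]
      · simpa [pvAStep, pvBStep, hb, hk, pvAddLast, show ¬ PySem.List.pyGet? l.toList 0 = some '/' by simpa using hk] using
          ih json k (d ++ if l = "null" then "{\"error\":\"null\"}" else l)

-- phase 1: before the first key line B's block list is empty and A only touches data
theorem pv_phase1 (ls : List String) (k n nm t d : String) :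
    pvFin (ls.foldl pvAStep ("[", k, n, nm, t, d, true)) =
    "[" ++ pvTail (ls.foldl pvBStep []) := by
  induction ls generalizing k n nm t d with
  | nil => simp [pvFin, pvTail, pv_join_nil]
  | cons l ls ih =>
    by_cases hb : PySem.Str.strip l = ""
    · simpa [pvAStep, pvBStep, hb] using ih k n nm t d
    · by_cases hk : PySem.Str.pyGet? l 0 = some '/'
      · have hA : pvAStep ("[", k, n, nm, t, d, true) l = ("[", l,
            PySem.List.pyGetD ((PySem.Str.split? l "/").getD []) 2 "",
            PySem.List.pyGetD ((PySem.Str.split? l "/").getD []) (-1) "",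
            PySem.List.pyGetD ((PySem.Str.split? l "/").getD []) 4 "", "", false) := by
          simp [pvAStep, hb, show PySem.List.pyGet? l.toList 0 = some '/' by simpa using hk]
        have hB : pvBStep [] l = [(l, "")] := by simp [pvBStep, hb, show PySem.List.pyGet? l.toList 0 = some '/' by simpa using hk]
        rw [List.foldl_cons, List.foldl_cons, hA, hB, pv_agree ls "[" l ""]
      · simpa [pvAStep, pvBStep, hb, hk, pvAddLast, show ¬ PySem.List.pyGet? l.toList 0 = some '/' by simpa using hk] using
          ih k n nm t (d ++ if l = "null" then "{\"error\":\"null\"}" else l)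

-- ===== VERDICT (by name: the statement is the Claim_ definition above) =====
theorem convert_etcd_dump_to_json_spec : Claim_equal_convert_etcd_dump_to_json := by
  intro dump _ _
  unfold Spec_convert_etcd_dump_to_json convert_etcd_dump_to_json convert_etcd_dump_to_json_alt
  have := pv_phase1 (PySem.Str.splitlines dump) "" "" "" "" ""
  simpa [pvFin, pvTail, String.append_assoc] using this
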